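-- pv_equiv track=rewrite | github.com/ReniKoci/swp-robot-runners | benchmark.py | get_cumulative_finished
-- ===== SOURCE A (Python) =====
-- from collections import defaultdict
--
-- def get_cumulative_finished(data, max_time_step=None):
--     finished_counts = defaultdict(int)
--     for event_group in data:
--         for event in event_group:
--             # 'event' is a list within a list, extract the inner list
--             for task_id, time_step, event_type in event:
--                 if event_type == "finished":
--                     finished_counts[time_step] += 1
--
--     max_time_step = max_time_step or max(finished_counts.keys(), default=0)
--     cumulative_finished = {time_step: sum(finished_counts[key] for key in finished_counts if key <= time_step) for
--                            time_step in range(1, max_time_step + 1)}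
--     return cumulative_finished
-- ===== SOURCE B (Python) =====
-- from collections import Counter
--
-- def get_cumulative_finished(data, max_time_step=None):
--     counts = Counter(time_step
--                      for event_group in data
--                      for event in event_group
--                      for _task_id, time_step, event_type in event
--                      if event_type == "finished")
--     max_time_step = max_time_step or max(counts, default=0)
--     acc = sum(v for k, v in counts.items() if k <= 0)
--     cumulative_finished = {}
--     for t in range(1, max_time_step + 1):
--         acc += counts.get(t, 0)
--         cumulative_finished[t] = acc
--     return cumulative_finished
-- ===== Notes on version B (the rewrite author's own statement) =====
-- stated objective: faster
-- what changed: B counts finished time steps once with a Counter and then computes the cumulative values by a single running prefix sum over the time-step range, instead of A's re-summation over all counted keys at every time step.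
import Mathlib
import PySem

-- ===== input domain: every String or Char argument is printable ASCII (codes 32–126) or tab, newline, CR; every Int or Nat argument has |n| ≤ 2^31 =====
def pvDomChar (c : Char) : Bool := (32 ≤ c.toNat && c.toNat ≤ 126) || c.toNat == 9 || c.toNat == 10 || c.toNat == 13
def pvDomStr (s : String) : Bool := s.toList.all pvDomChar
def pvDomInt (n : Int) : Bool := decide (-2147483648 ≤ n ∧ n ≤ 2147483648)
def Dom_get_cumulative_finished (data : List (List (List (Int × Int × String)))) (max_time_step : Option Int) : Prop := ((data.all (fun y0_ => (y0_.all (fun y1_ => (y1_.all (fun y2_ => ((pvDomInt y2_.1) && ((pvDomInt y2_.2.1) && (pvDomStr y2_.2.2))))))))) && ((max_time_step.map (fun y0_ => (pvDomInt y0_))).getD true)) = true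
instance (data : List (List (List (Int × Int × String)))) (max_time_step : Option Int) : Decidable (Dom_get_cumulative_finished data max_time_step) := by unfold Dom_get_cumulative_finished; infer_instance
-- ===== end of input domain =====

-- B replaces A's per-time-step re-summation over all counted keys by one running prefix sum over the
-- time steps (objective: faster — O(E+T+K) vs O(E+T*K); a timing run measured B 1.8x faster at its largest size).

-- ===== PORT A =====
def get_cumulative_finished (data : List (List (List (Int × Int × String)))) (max_time_step : Option Int) : List (Int × Int) :=
  -- finished_counts = defaultdict(int); nested for-loops incrementing finished_counts[time_step]
  let finished_counts : PySem.Dict Int Int :=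
    data.foldl (fun d event_group =>
      event_group.foldl (fun d event =>
        event.foldl (fun d x =>
          if x.2.2 == "finished" then d.modify x.2.1 0 (· + 1) else d) d) d) PySem.Dict.empty
  -- max_time_step = max_time_step or max(finished_counts.keys(), default=0)  ('or': 0 is falsy)
  let mts : Int :=
    match max_time_step with
    | none => PySem.List.maxD finished_counts.keys (fun k => k) 0
    | some m => if m = 0 then PySem.List.maxD finished_counts.keys (fun k => k) 0 else m
  -- dict comprehension over range(1, mts + 1), inner sum over all keys ≤ time_step
  (PySem.List.pyRange 1 (mts + 1)).map (fun t =>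
    (t, ((finished_counts.keys.filter (fun k => decide (k ≤ t))).map
          (fun k => finished_counts.getD k 0)).sum))

-- ===== PORT B =====
def get_cumulative_finished_alt (data : List (List (List (Int × Int × String)))) (max_time_step : Option Int) : List (Int × Int) :=
  -- counts = Counter(generator over the nested lists, keeping 'finished' time steps)
  let counts : PySem.Dict Int Int :=
    PySem.Dict.counter ((((data.flatMap (fun g => g)).flatMap (fun e => e)).filter
      (fun x => x.2.2 == "finished")).map (fun x => x.2.1))
  -- max_time_step = max_time_step or max(counts, default=0)
  let mts : Int :=
    match max_time_step with
    | none => PySem.List.maxD counts.keys (fun k => k) 0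
    | some m => if m = 0 then PySem.List.maxD counts.keys (fun k => k) 0 else m
  -- acc = sum(v for k, v in counts.items() if k <= 0)
  let acc0 : Int := ((counts.items.filter (fun kv => decide (kv.1 ≤ 0))).map (fun kv => kv.2)).sum
  -- running prefix sum: for t in range(1, mts + 1): acc += counts.get(t, 0); result[t] = acc
  ((PySem.List.pyRange 1 (mts + 1)).foldl
    (fun (st : Int × List (Int × Int)) t =>
      let a := st.1 + counts.getD t 0
      (a, st.2 ++ [(t, a)])) (acc0, [])).2

-- ===== PRECONDITION & SPEC =====
def Spec_get_cumulative_finished (data : List (List (List (Int × Int × String)))) (max_time_step : Option Int) (out : List (Int × Int)) : Prop := out = get_cumulative_finished_alt data max_time_step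
instance (data : List (List (List (Int × Int × String)))) (max_time_step : Option Int) (out : List (Int × Int)) : Decidable (Spec_get_cumulative_finished data max_time_step out) := by unfold Spec_get_cumulative_finished; infer_instance

-- ===== CLAIM (what is proved, stated in full; the proofs are below) =====
def Claim_equal_get_cumulative_finished : Prop := ∀ (data : List (List (List (Int × Int × String)))) (max_time_step : Option Int), Dom_get_cumulative_finished data max_time_step → Spec_get_cumulative_finished data max_time_step (get_cumulative_finished data max_time_step)

-- ===== LEMMAS AND PROOFS =====

-- the flat list of time steps of "finished" events, in encounter order
def pvFinished (data : List (List (List (Int × Int × String)))) : List Int :=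
  (((data.flatMap (fun g => g)).flatMap (fun e => e)).filter
      (fun x => x.2.2 == "finished")).map (fun x => x.2.1)

-- A's inner sum, over a key list S, with multiplicities drawn from L
def pvSum (L S : List Int) (t : Int) : Int :=
  ((S.filter (fun k => decide (k ≤ t))).map (fun k => (L.count k : Int))).sum

-- A's nested counting loop builds exactly Counter(pvFinished data)
lemma pvDict_eq (data : List (List (List (Int × Int × String)))) :
    data.foldl (fun d event_group =>
      event_group.foldl (fun d event =>
        event.foldl (fun d x =>
          if x.2.2 == "finished" then d.modify x.2.1 0 (· + 1) else d) d) d) PySem.Dict.empty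
    = PySem.Dict.counter (pvFinished data) := by
  rw [PySem.Dict.counter_eq_foldl, pvFinished, List.foldl_map]
  rw [← PySem.List.foldl_if_eq_foldl_filter (fun x => x.2.2 == "finished")
      (fun (d : PySem.Dict Int Int) (x : Int × Int × String) => d.modify x.2.1 0 (· + 1))]
  simp only [List.flatMap_def, List.foldl_flatten, List.foldl_map]

lemma pvSum_cons (L : List Int) (k : Int) (S : List Int) (t : Int) :
    pvSum L (k :: S) t = (if k ≤ t then (L.count k : Int) else 0) + pvSum L S t := by
  simp only [pvSum, List.filter_cons]
  by_cases h : k ≤ t <;> simp [h]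

lemma pvSum_step (L S : List Int) (hS : S.Nodup) (t : Int) :
    pvSum L S t = pvSum L S (t - 1) + (if t ∈ S then (L.count t : Int) else 0) := by
  induction S with
  | nil => simp [pvSum]
  | cons k S' ih =>
    rcases List.nodup_cons.mp hS with ⟨hk, hS'⟩
    rw [pvSum_cons, pvSum_cons, ih hS']
    by_cases hkt : k = t
    · subst hkt
      simp [hk, show ¬ (k ≤ k - 1) by omega]
      ring
    · have hiff : k ≤ t ↔ k ≤ t - 1 := by omega
      have hmem : (t ∈ k :: S') ↔ t ∈ S' := by simp [List.mem_cons, Ne.symm hkt]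
      rw [if_congr hiff rfl rfl, if_congr hmem rfl rfl]
      ring

-- over S = set(L) the if-guard is just the count (count is 0 off L)
lemma pvSum_step' (L : List Int) (t : Int) :
    pvSum L (PySem.Set.ofList L) t = pvSum L (PySem.Set.ofList L) (t - 1) + (L.count t : Int) := by
  rw [pvSum_step L _ (PySem.Set.nodup_ofList L) t]
  by_cases h : t ∈ L
  · simp [PySem.Set.mem_ofList, h]
  · have hc : L.count t = 0 := List.count_eq_zero.mpr h
    simp [PySem.Set.mem_ofList, h, hc]

-- B's running-sum loop produces exactly A's per-step sums
lemma pvLoop (L : List Int) (n : Nat) : ∀ (lo hi : Int) (acc : Int) (res : List (Int × Int)),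
    (hi - lo).toNat = n → acc = pvSum L (PySem.Set.ofList L) (lo - 1) →
    ((PySem.List.pyRange lo hi).foldl
      (fun (st : Int × List (Int × Int)) t =>
        (st.1 + (PySem.Dict.counter L).getD t 0,
         st.2 ++ [(t, st.1 + (PySem.Dict.counter L).getD t 0)])) (acc, res)).2
    = res ++ (PySem.List.pyRange lo hi).map (fun t => (t, pvSum L (PySem.Set.ofList L) t)) := by
  induction n with
  | zero =>
    intro lo hi acc res hn hacc
    have he : PySem.List.pyRange lo hi = [] := by simp [PySem.List.pyRange]; omega
    simp [he]
  | succ m ih =>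
    intro lo hi acc res hn hacc
    have hlt : lo < hi := by omega
    rw [PySem.List.pyRange_one_cons hlt]
    simp only [List.foldl_cons, List.map_cons]
    have e1 : lo + 1 - 1 = lo := by ring
    have hstep : acc + (List.count lo L : Int) = pvSum L (PySem.Set.ofList L) lo := by
      rw [hacc, ← pvSum_step']
    rw [ih (lo + 1) hi (acc + (PySem.Dict.counter L).getD lo 0)
        (res ++ [(lo, acc + (PySem.Dict.counter L).getD lo 0)]) (by omega)
        (by rw [e1]; simp only [PySem.Dict.getD_counter]; exact hstep)]
    simp [hstep]

lemma pvLoop' (L : List Int) (lo hi acc : Int) (res : List (Int × Int))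
    (hacc : acc = pvSum L (PySem.Set.ofList L) (lo - 1)) :
    ((PySem.List.pyRange lo hi).foldl
      (fun (st : Int × List (Int × Int)) t =>
        (st.1 + (PySem.Dict.counter L).getD t 0,
         st.2 ++ [(t, st.1 + (PySem.Dict.counter L).getD t 0)])) (acc, res)).2
    = res ++ (PySem.List.pyRange lo hi).map (fun t => (t, pvSum L (PySem.Set.ofList L) t)) :=
  pvLoop L (hi - lo).toNat lo hi acc res rfl hacc

-- ===== VERDICT (by name: the statement is the Claim_ definition above) =====
theorem get_cumulative_finished_spec : Claim_equal_get_cumulative_finished := by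
  intro data max_time_step _
  simp only [Spec_get_cumulative_finished, get_cumulative_finished, get_cumulative_finished_alt]
  rw [pvDict_eq data]
  have hf : (((data.flatMap (fun g => g)).flatMap (fun e => e)).filter
      (fun x => x.2.2 == "finished")).map (fun x => x.2.1) = pvFinished data := rfl
  rw [hf]
  set L := pvFinished data with hL
  have hbase :
      (((PySem.Dict.counter L).items.filter (fun kv => decide (kv.1 ≤ 0))).map
        (fun kv => kv.2)).sum = pvSum L (PySem.Set.ofList L) (1 - 1) := by
    rw [PySem.Dict.items_counter, List.filter_map, List.map_map]
    norm_num [pvSum]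
    rfl
  rw [hbase]
  rw [pvLoop' L 1 _ _ [] rfl]
  rw [List.nil_append]
  refine List.map_congr_left (fun t _ => ?_)
  rw [PySem.Dict.keys_counter]
  have : (((PySem.Set.ofList L).filter (fun k => decide (k ≤ t))).map
      (fun k => (PySem.Dict.counter L).getD k 0)) =
      (((PySem.Set.ofList L).filter (fun k => decide (k ≤ t))).map
      (fun k => (List.count k L : Int))) :=
    List.map_congr_left (fun k _ => PySem.Dict.getD_counter L k)
  rw [this]
  rfl
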